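-- pv_equiv track=rewrite | github.com/acc-cosc-1336-spring-2025/course-omar0195-cloud | src/homework/h_strings/strings.py | get_dna_complement
-- ===== SOURCE A (Python) =====
-- def get_dna_complement(dna):
--
--     complement = ""
--
--     for num in range (len(dna)):
--
--         if dna[num] =="A":
--             complement += "T"
--
--         elif dna[num] == "T":
--             complement += "A"
--
--         elif dna[num] == "C":
--             complement += "G"
--
--         elif dna[num] == "G":
--             complement += "C"
--
--         else:
--             print ("No DNA Character Found")
--
--     reverse_complement = ""
--
--     for num in range (len(complement) -1, -1, -1):
--         reverse_complement += complement[num]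
--
--     return reverse_complement
-- ===== SOURCE B (Python) =====
-- def get_dna_complement(dna):
--     comp = {'A': 'T', 'T': 'A', 'C': 'G', 'G': 'C'}
--     result = ""
--     for ch in dna:
--         if ch in comp:
--             result = comp[ch] + result
--         else:
--             print("No DNA Character Found")
--     return result
-- ===== Notes on version B (the rewrite author's own statement) =====
-- stated objective: simpler
-- what changed: One pass with a complement dict that prepends each mapped base to the accumulator, replacing A's two sequential loops (build the complement, then reverse it character by character).
import Mathlib
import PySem

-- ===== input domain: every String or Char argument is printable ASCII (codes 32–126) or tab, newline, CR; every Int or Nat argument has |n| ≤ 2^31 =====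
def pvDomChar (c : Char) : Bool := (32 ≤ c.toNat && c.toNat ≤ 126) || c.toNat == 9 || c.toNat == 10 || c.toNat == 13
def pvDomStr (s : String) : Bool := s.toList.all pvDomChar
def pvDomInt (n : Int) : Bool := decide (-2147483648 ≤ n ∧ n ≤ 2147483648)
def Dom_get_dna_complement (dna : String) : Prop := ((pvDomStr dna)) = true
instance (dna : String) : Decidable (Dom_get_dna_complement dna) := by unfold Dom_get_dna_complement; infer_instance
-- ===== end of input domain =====

-- B replaces A's two loops (build complement, then reverse by indexing) with one
-- dict-driven pass that prepends; objective: simpler. Equivalence is about the return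
-- value only (both Pythons print "No DNA Character Found" on non-ACGT characters).

-- ===== PORT A =====
-- the if/elif chain of A's first loop (print in the else branch has no effect on the value)
def pvStepA (acc : List Char) (c : Char) : List Char :=
  if c = 'A' then acc ++ ['T']
  else if c = 'T' then acc ++ ['A']
  else if c = 'C' then acc ++ ['G']
  else if c = 'G' then acc ++ ['C']
  else acc

def get_dna_complement (dna : String) : String :=
  let l := dna.toList
  -- for num in range(len(dna)): … dna[num] …
  let complement :=
    (PySem.List.pyRange 0 (PySem.List.len l) 1).foldl
      (fun acc num => pvStepA acc (PySem.List.pyGetD l num ' ')) []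
  -- for num in range(len(complement) - 1, -1, -1): reverse_complement += complement[num]
  let reverse_complement :=
    (PySem.List.pyRange (PySem.List.len complement - 1) (-1) (-1)).foldl
      (fun acc num => acc ++ [PySem.List.pyGetD complement num ' ']) []
  String.ofList reverse_complement

-- ===== PORT B =====
def pvCompDict : PySem.Dict Char Char :=
  (((PySem.Dict.empty.insert 'A' 'T').insert 'T' 'A').insert 'C' 'G').insert 'G' 'C' 

def get_dna_complement_alt (dna : String) : String :=
  String.ofList (dna.toList.foldl
    (fun result ch =>
      match pvCompDict.get? ch with
      | some k => k :: result
      | none => result) [])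

-- ===== PRECONDITION & SPEC =====
def Spec_get_dna_complement (dna : String) (out : String) : Prop := out = get_dna_complement_alt dna
instance (dna : String) (out : String) : Decidable (Spec_get_dna_complement dna out) := by unfold Spec_get_dna_complement; infer_instance

-- ===== CLAIM (what is proved, stated in full; the proofs are below) =====
def Claim_equal_get_dna_complement : Prop := ∀ (dna : String), Dom_get_dna_complement dna → Spec_get_dna_complement dna (get_dna_complement dna)

-- ===== LEMMAS AND PROOFS =====

-- the per-character complement as an Option
def pvComp (c : Char) : Option Char :=
  if c = 'A' then some 'T'
  else if c = 'T' then some 'A'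
  else if c = 'C' then some 'G'
  else if c = 'G' then some 'C'
  else none

lemma pvCompDict_get? (c : Char) : pvCompDict.get? c = pvComp c := by
  simp only [pvCompDict, pvComp, PySem.Dict.get?_insert, PySem.Dict.get?_empty]
  split_ifs <;> simp_all

lemma pvStepA_eq (acc : List Char) (c : Char) :
    pvStepA acc c = acc ++ (pvComp c).toList := by
  simp [pvStepA, pvComp]; split_ifs <;> simp

lemma foldlA_eq (l acc : List Char) :
    l.foldl pvStepA acc = acc ++ l.filterMap pvComp := by
  induction l generalizing acc with
  | nil => simp
  | cons c t ih =>
    simp only [List.foldl_cons, ih, pvStepA_eq, List.filterMap_cons]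
    cases pvComp c <;> simp

lemma foldlB_eq (l acc : List Char) :
    l.foldl (fun result ch =>
      match pvCompDict.get? ch with
      | some k => k :: result
      | none => result) acc = (l.filterMap pvComp).reverse ++ acc := by
  have hf : (fun (result : List Char) ch =>
      match pvCompDict.get? ch with
      | some k => k :: result
      | none => result) = (fun result ch =>
      match pvComp ch with
      | some k => k :: result
      | none => result) := by
    funext r ch; rw [pvCompDict_get?]
  rw [hf]
  induction l generalizing acc with
  | nil => simp
  | cons c t ih =>
    simp only [List.foldl_cons, List.filterMap_cons]
    cases pvComp c <;> simp [ih]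

-- A's second loop, over range(n-1, -1, -1), reverses the list it indexes
lemma revLoop_eq (xs : List Char) (d : Char) (n : Nat) (h : n ≤ xs.length) (init : List Char) :
    (PySem.List.pyRange ((n : Int) - 1) (-1) (-1)).foldl
      (fun acc num => acc ++ [PySem.List.pyGetD xs num d]) init
    = init ++ (xs.take n).reverse := by
  induction n generalizing init with
  | zero =>
    rw [PySem.List.pyRange_neg_one_eq_nil (by omega)]
    simp
  | succ m ih =>
    have hcast : ((m + 1 : Nat) : Int) - 1 = (m : Int) := by push_cast; ring
    rw [hcast, PySem.List.pyRange_neg_one_cons (by omega), List.foldl_cons]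
    have hm : m < xs.length := by omega
    rw [ih (by omega)]
    have hx : PySem.List.pyGetD xs (m : Int) d = xs[m] := by
      rw [PySem.List.pyGetD_natCast]
      simp [List.getD, List.getElem?_eq_getElem hm]
    have hrev : (List.take (m + 1) xs).reverse = xs[m] :: (List.take m xs).reverse := by
      rw [List.take_add_one]
      simp [List.getElem?_eq_getElem hm]
    rw [hx, hrev]
    simp

theorem get_dna_complement_eq (dna : String) :
    get_dna_complement dna = get_dna_complement_alt dna := by
  unfold get_dna_complement get_dna_complement_alt
  simp only [PySem.List.len_eq]
  rw [PySem.List.foldl_pyRange_zero_pyGetD' dna.toList ' ' pvStepA []]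
  rw [foldlA_eq dna.toList [], foldlB_eq dna.toList []]
  set cl := dna.toList.filterMap pvComp with hcl
  have h2 := revLoop_eq cl ' ' cl.length (le_refl _) []
  simp only [List.take_length, List.nil_append] at h2 ⊢
  rw [h2]
  simp

-- ===== VERDICT (by name: the statement is the Claim_ definition above) =====
theorem get_dna_complement_spec : Claim_equal_get_dna_complement := by
  intro dna _
  exact get_dna_complement_eq dna
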